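-- pv_equiv track=rewrite | github.com/noggrie21/Algorithm | solved/swea_4366_정식이의 은행업무/test.py | pick_out
-- ===== SOURCE A (Python) =====
-- def pick_out(num, N, base, lookup):
--     candidates = set()  # 한 자리씩 변경 후 10진수로 변환하여 담을 예정
--
--     for i in range(N):
--         temp = num[i]   # num[i]의 초기값을 temp에 보관
--         while True:
--             num[i] = (num[i] + 1) % base # num[i]값 바꿔보기 (+1하되 base를 넘지 않도록 조정)
--             if num[i] == temp:   # num[i]의 초기값인 temp와 같아지면 while 종료
--                 break
--             total = 0
--             for j in range(N):   # num[i]값이 변경된 상태에서 10진수 값 구하기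
--                 total += num[j] * lookup[N - 1 - j]
--             candidates.add(total)
--     return candidates
-- ===== SOURCE B (Python) =====
-- def pick_out(num, N, base, lookup):
--     # Precompute the base total once; a single-digit change shifts it by
--     # (new_digit - old_digit) * weight.
--     base_total = sum(num[j] * lookup[N - 1 - j] for j in range(N))
--     candidates = set()
--     for i in range(N):
--         weight = lookup[N - 1 - i]
--         digit = num[i]
--         for delta in range(1, base):
--             candidates.add(base_total + ((digit + delta) % base - digit) * weight)
--     return candidates
-- ===== Notes on version B (the rewrite author's own statement) =====
-- stated objective: alternative
-- what changed: B computes the decimal value of the original digit string once and derives each candidate by an incremental adjustment (delta_digit * weight), instead of A's mutate-and-re-sum while loop over all N positions for every candidate.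
-- outside the precondition, e.g. on pick_out([-1], 1, -2, [1]): A returns {0}, B returns set(); on pick_out([2], 1, 0, [1]): A raises ZeroDivisionError, B returns set(); on pick_out([5], 1, 3, [1]): A does not finish within the time limit, B returns {0, 1}
import Mathlib
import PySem

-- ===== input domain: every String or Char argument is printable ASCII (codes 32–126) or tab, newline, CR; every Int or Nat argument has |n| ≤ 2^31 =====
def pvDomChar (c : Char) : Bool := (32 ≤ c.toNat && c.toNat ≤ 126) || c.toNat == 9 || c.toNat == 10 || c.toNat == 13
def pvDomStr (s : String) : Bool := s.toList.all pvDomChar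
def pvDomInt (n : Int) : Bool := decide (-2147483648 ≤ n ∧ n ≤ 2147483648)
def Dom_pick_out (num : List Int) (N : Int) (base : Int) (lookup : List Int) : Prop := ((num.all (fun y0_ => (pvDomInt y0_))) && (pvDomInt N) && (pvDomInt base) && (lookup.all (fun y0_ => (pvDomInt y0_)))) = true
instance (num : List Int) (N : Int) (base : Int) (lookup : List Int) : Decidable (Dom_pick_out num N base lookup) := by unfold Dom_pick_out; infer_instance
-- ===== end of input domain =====

-- B precomputes the digit string's decimal value once and derives each candidate by an
-- incremental adjustment, instead of A's mutate-and-re-sum while loop (A temporarily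
-- mutates num but restores it before returning, so only the return value is at stake).

-- ===== PORT A =====
-- total = 0; for j in range(N): total += num[j] * lookup[N - 1 - j]   (shared by both Pythons)
def pvDecTotal (num : List Int) (N : Int) (lookup : List Int) : Int :=
  (PySem.List.pyRange 0 N 1).foldl
    (fun total j => total + PySem.List.pyGetD num j 0 * PySem.List.pyGetD lookup (N - 1 - j) 0) 0

-- the 'while True' loop of A, with fuel (the loop makes exactly `base` iterations on Pre_)
def pvWhileA (lookup : List Int) (N base i temp : Int) :
    Nat → List Int → PySem.Set Int → List Int × PySem.Set Int
  | 0, num, cand => (num, cand)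
  | f+1, num, cand =>
    let v := PySem.Int.mod (PySem.List.pyGetD num i 0 + 1) base
    let num' := PySem.List.pySetD num i v
    if v = temp then (num', cand)
    else pvWhileA lookup N base i temp f num' (PySem.Set.add cand (pvDecTotal num' N lookup))

def pick_out (num : List Int) (N : Int) (base : Int) (lookup : List Int) : List Int :=
  ((PySem.List.pyRange 0 N 1).foldl
    (fun (st : List Int × PySem.Set Int) i =>
      pvWhileA lookup N base i (PySem.List.pyGetD st.1 i 0) base.toNat st.1 st.2)
    (num, (PySem.Set.empty : PySem.Set Int))).2

-- ===== PORT B =====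
def pick_out_alt (num : List Int) (N : Int) (base : Int) (lookup : List Int) : List Int :=
  let baseTotal := pvDecTotal num N lookup
  (PySem.List.pyRange 0 N 1).foldl
    (fun cand i =>
      let weight := PySem.List.pyGetD lookup (N - 1 - i) 0
      let digit := PySem.List.pyGetD num i 0
      (PySem.List.pyRange 1 base 1).foldl
        (fun c delta =>
          PySem.Set.add c (baseTotal + (PySem.Int.mod (digit + delta) base - digit) * weight))
        cand)
    (PySem.Set.empty : PySem.Set Int)

-- ===== PRECONDITION & SPEC =====
-- Pre_ restricts to the task's natural domain (N positions available in num and lookup,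
-- base ≥ 1, each inspected digit a proper base-`base` digit): outside it A raises
-- (IndexError, ZeroDivisionError), loops forever, or — for base ≤ -1 with digits in
-- (base,0], an input outside any sensible digit representation — returns an accidental
-- value B does not copy; N ≤ 0 (where A returns set()) is kept inside.
def Pre_pick_out (num : List Int) (N : Int) (base : Int) (lookup : List Int) : Prop :=
  N ≤ 0 ∨ (N ≤ (num.length : Int) ∧ N ≤ (lookup.length : Int) ∧ 1 ≤ base ∧
    ∀ x ∈ num.take N.toNat, 0 ≤ x ∧ x < base)
instance (num : List Int) (N : Int) (base : Int) (lookup : List Int) : Decidable (Pre_pick_out num N base lookup) := by unfold Pre_pick_out; infer_instance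
def pvWitness_pick_out : List Int × Int × Int × List Int := ([1, 0], 2, 2, [2, 1])

def Spec_pick_out (num : List Int) (N : Int) (base : Int) (lookup : List Int) (out : List Int) : Prop := out = pick_out_alt num N base lookup
instance (num : List Int) (N : Int) (base : Int) (lookup : List Int) (out : List Int) : Decidable (Spec_pick_out num N base lookup out) := by unfold Spec_pick_out; infer_instance

-- ===== CLAIM (what is proved, stated in full; the proofs are below) =====
def Claim_equal_pick_out : Prop := ∀ (num : List Int) (N : Int) (base : Int) (lookup : List Int), Dom_pick_out num N base lookup → Pre_pick_out num N base lookup → Spec_pick_out num N base lookup (pick_out num N base lookup)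

-- ===== LEMMAS AND PROOFS =====

theorem pv_foldl_add (f : Int → Int) (l : List Int) (a : Int) :
    l.foldl (fun t j => t + f j) a = a + (l.map f).sum := by
  induction l generalizing a with
  | nil => simp
  | cons x xs ih => simp [ih]; ring

theorem pvDecTotal_eq (num : List Int) (N : Int) (lookup : List Int) :
    pvDecTotal num N lookup =
      ((PySem.List.pyRange 0 N 1).map
        (fun j => PySem.List.pyGetD num j 0 * PySem.List.pyGetD lookup (N - 1 - j) 0)).sum := by
  simpa using pv_foldl_add
    (fun j => PySem.List.pyGetD num j 0 * PySem.List.pyGetD lookup (N - 1 - j) 0)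
    (PySem.List.pyRange 0 N 1) 0

theorem pv_total_set (num lookup : List Int) (N i d : Int)
    (h0 : 0 ≤ i) (hiN : i < N) (hlen : N ≤ (num.length : Int)) :
    pvDecTotal (PySem.List.pySetD num i d) N lookup
      = pvDecTotal num N lookup
        + (d - PySem.List.pyGetD num i 0) * PySem.List.pyGetD lookup (N - 1 - i) 0 := by
  rw [pvDecTotal_eq, pvDecTotal_eq,
      PySem.List.pyRange_one_append 0 i N h0 (le_of_lt hiN),
      PySem.List.pyRange_one_cons hiN]
  have hset : PySem.List.pySetD num i d = num.set i.toNat d :=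
    PySem.List.pySetD_of_nonneg num d h0
  have hid : PySem.List.pyGetD (PySem.List.pySetD num i d) i 0 = d := by
    rw [hset, PySem.List.pyGetD_eq_getElem (num.set i.toNat d) 0 h0 (by rw [List.length_set]; omega)]
    exact List.getElem_set_self (show i.toNat < (num.set i.toNat d).length by rw [List.length_set]; omega)
  have hcong : ∀ (l : List Int), (∀ j ∈ l, 0 ≤ j ∧ j ≠ i ∧ j < N) →
      l.map (fun j => PySem.List.pyGetD (PySem.List.pySetD num i d) j 0 *
        PySem.List.pyGetD lookup (N - 1 - j) 0)
      = l.map (fun j => PySem.List.pyGetD num j 0 * PySem.List.pyGetD lookup (N - 1 - j) 0) := by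
    intro l hl
    refine List.map_congr_left (fun j hj => ?_)
    obtain ⟨hj0, hji, hjN⟩ := hl j hj
    rw [hset, PySem.List.pyGetD_eq_getElem (num.set i.toNat d) 0 hj0 (by rw [List.length_set]; omega),
        PySem.List.pyGetD_eq_getElem num 0 hj0 (by omega),
        List.getElem_set_ne (by omega)]
  rw [List.map_append, List.map_append, List.map_cons, List.map_cons,
      hcong _ (fun j hj => by
        have := PySem.List.mem_pyRange_one.mp hj; exact ⟨this.1, by omega, by omega⟩),
      hcong _ (fun j hj => by
        have := PySem.List.mem_pyRange_one.mp hj; exact ⟨by omega, by omega, (PySem.List.mem_pyRange_one.mp hj).2⟩),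
      hid]
  simp [List.sum_append]
  ring

theorem pv_set_self (num : List Int) (i : Int) (h0 : 0 ≤ i) (hl : i < (num.length : Int)) :
    PySem.List.pySetD num i (PySem.List.pyGetD num i 0) = num := by
  rw [PySem.List.pySetD_of_nonneg num _ h0,
      PySem.List.pyGetD_eq_getElem num 0 h0 hl]
  exact List.set_getElem_self (by omega)

theorem pv_get_set (num : List Int) (i x : Int) (h0 : 0 ≤ i) (hl : i < (num.length : Int)) :
    PySem.List.pyGetD (PySem.List.pySetD num i x) i 0 = x := by
  rw [PySem.List.pySetD_of_nonneg num x h0,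
      PySem.List.pyGetD_eq_getElem (num.set i.toNat x) 0 h0 (by rw [List.length_set]; omega)]
  exact List.getElem_set_self (show i.toNat < (num.set i.toNat x).length by rw [List.length_set]; omega)

theorem pv_set_set (num : List Int) (i x y : Int) (h0 : 0 ≤ i) :
    PySem.List.pySetD (PySem.List.pySetD num i x) i y = PySem.List.pySetD num i y := by
  rw [PySem.List.pySetD_of_nonneg num x h0, PySem.List.pySetD_of_nonneg _ y h0,
      PySem.List.pySetD_of_nonneg num y h0, List.set_set]

theorem pv_emod_succ (base : Int) (x : Int) : (x % base + 1) % base = (x + 1) % base := by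
  conv_rhs => rw [Int.add_emod]
  rw [Int.add_emod (x % base) 1 base, Int.emod_emod_of_dvd x dvd_rfl]

theorem pv_while_spec (num lookup : List Int) (N base i temp : Int)
    (h0 : 0 ≤ i) (hiN : i < N) (hlen : N ≤ (num.length : Int)) (hb : 1 ≤ base)
    (htemp : PySem.List.pyGetD num i 0 = temp) (ht0 : 0 ≤ temp) (htb : temp < base) :
    ∀ (f : Nat) (δ : Int), 0 ≤ δ → δ + (f : Int) = base → ∀ (cand : PySem.Set Int),
    pvWhileA lookup N base i temp f (PySem.List.pySetD num i ((temp + δ) % base)) cand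
      = (num, (PySem.List.pyRange (δ + 1) base 1).foldl
          (fun c δ' => PySem.Set.add c
            (pvDecTotal num N lookup
              + ((temp + δ') % base - temp) * PySem.List.pyGetD lookup (N - 1 - i) 0)) cand) := by
  have hbpos : (0 : Int) < base := by omega
  have hlen' : i < (num.length : Int) := by omega
  have hsetself : PySem.List.pySetD num i temp = num := by
    rw [← htemp]; exact pv_set_self num i h0 hlen'
  intro f
  induction f with
  | zero =>
    intro δ hδ0 hδf cand
    have hδ : δ = base := by push_cast at hδf; omega
    have h1 : (temp + δ) % base = temp := by
      rw [show temp + δ = temp + base by omega, Int.add_emod_right]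
      exact Int.emod_eq_of_lt ht0 htb
    rw [h1, hsetself, pvWhileA, PySem.List.pyRange_one_eq_nil (by omega)]
    rfl
  | succ f ih =>
    intro δ hδ0 hδf cand
    have hδf' : δ + 1 + (f : Int) = base := by push_cast at hδf ⊢; omega
    have hv : PySem.Int.mod
        (PySem.List.pyGetD (PySem.List.pySetD num i ((temp + δ) % base)) i 0 + 1) base
        = (temp + δ + 1) % base := by
      rw [pv_get_set num i _ h0 hlen', PySem.Int.mod_eq_emod_of_pos hbpos, pv_emod_succ]
    by_cases hend : δ + 1 = base
    · have htv : (temp + δ + 1) % base = temp := by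
        have : temp + δ + 1 = temp + base := by omega
        rw [this, Int.add_emod_right]; exact Int.emod_eq_of_lt ht0 htb
      rw [pvWhileA]
      simp only [hv, htv]
      rw [pv_set_set num i _ temp h0, hsetself,
          PySem.List.pyRange_one_eq_nil (by omega)]
      rfl
    · have hne : ¬ ((temp + δ + 1) % base = temp) := by
        intro hEq
        have htmod : temp % base = temp := Int.emod_eq_of_lt ht0 htb
        have : (temp + δ + 1) % base = temp % base := by rw [hEq, htmod]
        have hz : (δ + 1) % base = 0 := by
          have := Int.emod_eq_emod_iff_emod_sub_eq_zero.mp this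
          simpa [show temp + δ + 1 - temp = δ + 1 by ring] using this
        have hdvd : base ∣ δ + 1 := Int.dvd_of_emod_eq_zero hz
        have : base ≤ δ + 1 := Int.le_of_dvd (by omega) hdvd
        omega
      rw [pvWhileA]
      simp only [hv, if_neg hne]
      rw [pv_set_set num i _ _ h0,
          pv_total_set num lookup N i _ h0 hiN hlen, htemp]
      have := ih (δ + 1) (by omega) hδf'
        (PySem.Set.add cand (pvDecTotal num N lookup
          + ((temp + δ + 1) % base - temp) * PySem.List.pyGetD lookup (N - 1 - i) 0))
      rw [show temp + δ + 1 = temp + (δ + 1) by ring] at this ⊢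
      rw [this, PySem.List.pyRange_one_cons (show δ + 1 < base by omega)]
      rfl

theorem pv_outer (num lookup : List Int) (N base : Int) (hb : 1 ≤ base)
    (hlen : N ≤ (num.length : Int))
    (hdig : ∀ x ∈ num.take N.toNat, 0 ≤ x ∧ x < base) :
    ∀ (is : List Int), (∀ i ∈ is, 0 ≤ i ∧ i < N) → ∀ (cand : PySem.Set Int),
    is.foldl (fun (st : List Int × PySem.Set Int) i =>
        pvWhileA lookup N base i (PySem.List.pyGetD st.1 i 0) base.toNat st.1 st.2) (num, cand)
      = (num, is.foldl (fun cand i =>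
          (PySem.List.pyRange 1 base 1).foldl
            (fun c delta => PySem.Set.add c (pvDecTotal num N lookup
              + ((PySem.List.pyGetD num i 0 + delta) % base - PySem.List.pyGetD num i 0)
                * PySem.List.pyGetD lookup (N - 1 - i) 0)) cand) cand) := by
  intro is
  induction is with
  | nil => intro _ cand; rfl
  | cons i is' ih =>
    intro hmem cand
    obtain ⟨hi0, hiN⟩ := hmem i List.mem_cons_self
    have hlen' : i < (num.length : Int) := by omega
    have htake : i.toNat < (num.take N.toNat).length := by
      rw [List.length_take]; omega
    have hdigit := hdig ((num.take N.toNat)[i.toNat]) (List.getElem_mem htake)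
    rw [List.getElem_take] at hdigit
    have htemp : PySem.List.pyGetD num i 0 = num[i.toNat] :=
      PySem.List.pyGetD_eq_getElem num 0 hi0 hlen'
    have hw := pv_while_spec num lookup N base i (num[i.toNat]) hi0 hiN hlen hb
      htemp hdigit.1 hdigit.2 base.toNat 0 le_rfl
      (by rw [Int.toNat_of_nonneg (by omega)]; ring) cand
    have hzero : PySem.List.pySetD num i ((num[i.toNat] + 0) % base) = num := by
      rw [show (num[i.toNat] + 0) % base = num[i.toNat] by
            rw [add_zero]; exact Int.emod_eq_of_lt hdigit.1 hdigit.2]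
      rw [← htemp]; exact pv_set_self num i hi0 hlen'
    rw [hzero] at hw
    rw [List.foldl_cons, List.foldl_cons, htemp, hw]
    rw [show (0 : Int) + 1 = 1 by ring]
    exact ih (fun j hj => hmem j (List.mem_cons_of_mem i hj)) _

-- ===== VERDICT (by name: the statement is the Claim_ definition above) =====
theorem pick_out_spec : Claim_equal_pick_out := by
  intro num N base lookup _ hpre
  unfold Spec_pick_out pick_out pick_out_alt
  rcases hpre with hN | ⟨h1, h2, h3, h4⟩
  · rw [PySem.List.pyRange_one_eq_nil hN]; rfl
  · have ho := pv_outer num lookup N base h3 h1 h4 (PySem.List.pyRange 0 N 1)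
      (fun j hj => by
        have := PySem.List.mem_pyRange_one.mp hj; exact ⟨this.1, this.2⟩)
      PySem.Set.empty
    rw [ho]
    simp only [PySem.Int.mod_eq_emod_of_pos (show (0 : Int) < base by omega)]
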